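-- pv_equiv track=rewrite | github.com/AmitPr/adventofcode-2020 | 5.py | find_row
-- ===== SOURCE A (Python) =====
-- def find_row(st, max, min):
--     mid = (max+min)//2
--     if st[0]=='F' or st[0]=='L':
--         if len(st[1:]):
--             return find_row(st[1:],mid,min)
--         else:
--             return min
--     else:
--         if len(st[1:]):
--             return find_row(st[1:],max,mid)
--         else:
--             return max-1
-- ===== SOURCE B (Python) =====
-- def find_row(st, max, min):
--     # fold over all characters narrowing the (max, min) range, then pick the
--     # answer from the final state based on the last character
--     for c in st:
--         mid = (max + min) // 2
--         if c == 'F' or c == 'L':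
--             max = mid
--         else:
--             min = mid
--     return min if st[-1] in ('F', 'L') else max - 1
-- ===== Notes on version B (the rewrite author's own statement) =====
-- stated objective: faster
-- what changed: Replaces the tail recursion with early exits (and O(n) st[1:] copies per step) by a single linear fold over the characters narrowing the (max,min) range, reading the answer off the final state via the last character (an F/L step never changes min and a B/R step never changes max).
import Mathlib
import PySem

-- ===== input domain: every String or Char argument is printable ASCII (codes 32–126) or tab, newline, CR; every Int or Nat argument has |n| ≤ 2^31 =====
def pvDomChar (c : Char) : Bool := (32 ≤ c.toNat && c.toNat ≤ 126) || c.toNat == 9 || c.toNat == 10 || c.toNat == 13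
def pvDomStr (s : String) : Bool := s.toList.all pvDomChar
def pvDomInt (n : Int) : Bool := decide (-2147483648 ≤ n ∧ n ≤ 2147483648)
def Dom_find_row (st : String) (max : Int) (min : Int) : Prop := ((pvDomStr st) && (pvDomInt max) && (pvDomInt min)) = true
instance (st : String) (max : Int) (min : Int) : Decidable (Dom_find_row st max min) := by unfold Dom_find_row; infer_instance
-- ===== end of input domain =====

-- B replaces A's early-exit tail recursion by a single fold over all characters plus a final
-- read of the last character; equivalence proved for nonempty strings (A raises IndexError on "").


-- ===== PORT A =====
-- A's recursion on the character list; the [] case is unreachable under Pre_find_row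
-- (Python raises IndexError at st[0] there).
def findRowGoA : List Char → Int → Int → Int
  | [], _, mn => mn
  | c :: rest, mx, mn =>
    let mid := PySem.Int.floordiv (mx + mn) 2
    if c = 'F' ∨ c = 'L' then
      if rest.length ≠ 0 then findRowGoA rest mid mn else mn
    else
      if rest.length ≠ 0 then findRowGoA rest mx mid else mx - 1

def find_row (st : String) (max : Int) (min : Int) : Int :=
  findRowGoA st.toList max min

-- ===== PORT B =====
-- one narrowing step of B's fold
def findRowStep (s : Int × Int) (c : Char) : Int × Int :=
  let mid := PySem.Int.floordiv (s.1 + s.2) 2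
  if c = 'F' ∨ c = 'L' then (mid, s.2) else (s.1, mid)

def find_row_alt (st : String) (max : Int) (min : Int) : Int :=
  let p := st.toList.foldl findRowStep (max, min)
  match PySem.List.pyGet? st.toList (-1) with    -- st[-1]; none = IndexError on ""
  | some c => if c = 'F' ∨ c = 'L' then p.2 else p.1 - 1
  | none => 0

-- ===== PRECONDITION & SPEC =====
-- A evaluates st[0] unconditionally, so it raises IndexError on the empty string.
def Pre_find_row (st : String) (max : Int) (min : Int) : Prop := st.toList ≠ []
instance (st : String) (max : Int) (min : Int) : Decidable (Pre_find_row st max min) := by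
  unfold Pre_find_row; infer_instance

def pvWitness_find_row : String × Int × Int := ("FBLR", 128, 0)

def Spec_find_row (st : String) (max : Int) (min : Int) (out : Int) : Prop := out = find_row_alt st max min
instance (st : String) (max : Int) (min : Int) (out : Int) : Decidable (Spec_find_row st max min out) := by unfold Spec_find_row; infer_instance

-- ===== CLAIM (what is proved, stated in full; the proofs are below) =====
def Claim_equal_find_row : Prop := ∀ (st : String) (max : Int) (min : Int), Dom_find_row st max min → Pre_find_row st max min → Spec_find_row st max min (find_row st max min)

-- ===== LEMMAS AND PROOFS =====

-- A's recursion equals B's fold-then-last-char reading, for nonempty lists.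
lemma findRowGoA_eq_fold (l : List Char) (hl : l ≠ []) (mx mn : Int) :
    findRowGoA l mx mn =
      (let p := l.foldl findRowStep (mx, mn)
       if l.getLast hl = 'F' ∨ l.getLast hl = 'L' then p.2 else p.1 - 1) := by
  induction l generalizing mx mn with
  | nil => exact absurd rfl hl
  | cons c rest ih =>
    cases rest with
    | nil =>
      simp only [findRowGoA, findRowStep, List.foldl, List.getLast]
      split_ifs <;> simp_all
    | cons d rest' =>
      have hne : (d :: rest') ≠ ([] : List Char) := by simp
      have hlast : (c :: d :: rest').getLast hl = (d :: rest').getLast hne := by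
        simp [List.getLast]
      rw [findRowGoA]
      simp only [List.length_cons, ne_eq, Nat.succ_ne_zero, not_false_eq_true, if_true, hlast]
      split_ifs with h <;> rw [ih hne] <;> simp_all [findRowStep]

-- ===== VERDICT (by name: the statement is the Claim_ definition above) =====
theorem find_row_spec : Claim_equal_find_row := by
  intro st mx mn _ hpre
  unfold Spec_find_row find_row find_row_alt
  rw [PySem.List.pyGet?_neg_one, List.getLast?_eq_some_getLast (l := st.toList) (h := hpre),
    findRowGoA_eq_fold st.toList hpre]
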